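-- pv_equiv track=rewrite | github.com/ohwwh/Personal_study | 알고리즘/EA 코테/영화표정렬.py | solution
-- ===== SOURCE A (Python) =====
-- def solution(movie):
-- 	l = len(list(set(movie)))
-- 	num = [0] * l
-- 	dict = {}
-- 	for e in movie:
-- 		if e not in dict:
-- 			dict[e] = 0
-- 		else:
-- 			dict[e] += 1
-- 	dict = sorted(dict.items(), key=lambda x: (-x[1], x[0]))
-- 	ret = []
-- 	for e in dict:
-- 		ret.append(e[0])
--
-- 	return ret
-- ===== SOURCE B (Python) =====
-- def solution(movie):
--     freq = {}
--     for e in movie: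
--         freq[e] = freq.get(e, 0) + 1
--     buckets = {}
--     maxf = 0
--     for title, c in freq.items():
--         if c not in buckets:
--             buckets[c] = []
--         buckets[c].append(title)
--         if c > maxf:
--             maxf = c
--     ret = []
--     for c in range(maxf, 0, -1):
--         ret += sorted(buckets.get(c, []))
--     return ret
-- ===== Notes on version B (the rewrite author's own statement) =====
-- stated objective: alternative
-- what changed: B replaces A's single sort of (title, count) pairs under the tuple key (-count, name) by a frequency dict bucketed into a count-indexed table, then a descending sweep over counts that lexicographically sorts each bucket and concatenates them.
import Mathlib
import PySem

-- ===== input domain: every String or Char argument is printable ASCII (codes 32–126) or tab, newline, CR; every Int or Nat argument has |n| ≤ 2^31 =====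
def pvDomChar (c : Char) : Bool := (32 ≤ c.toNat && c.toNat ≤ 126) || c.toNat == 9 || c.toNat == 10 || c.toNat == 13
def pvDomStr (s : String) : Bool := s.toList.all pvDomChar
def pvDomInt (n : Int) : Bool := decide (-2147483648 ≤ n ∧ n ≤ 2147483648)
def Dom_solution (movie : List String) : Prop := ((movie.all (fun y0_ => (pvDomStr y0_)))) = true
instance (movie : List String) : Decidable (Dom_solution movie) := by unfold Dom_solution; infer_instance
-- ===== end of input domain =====

-- B replaces A's single tuple-key sort of (title, count) pairs by a frequency table bucketed
-- by count and a descending sweep that sorts each bucket by name (objective: alternative).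

-- ===== PORT A =====
def solution (movie : List String) : List String :=
  let l : Int := ((PySem.Set.ofList movie : List String).length : Int)
  let _num : List Int := PySem.List.pyRepeat [0] l
  let d : PySem.Dict String Int :=
    movie.foldl (fun d e =>
      if d.contains e = false then d.insert e 0 else d.modify e 0 (· + 1))
      PySem.Dict.empty
  let ditems : List (String × Int) :=
    PySem.List.sorted2 d.items (fun x => -x.2) (fun x => x.1)
  ditems.foldl (fun ret e => ret ++ [e.1]) []

-- ===== PORT B =====
def solution_alt (movie : List String) : List String :=
  let freq : PySem.Dict String Int :=
    movie.foldl (fun d e => d.insert e (d.getD e 0 + 1)) PySem.Dict.empty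
  let bm : PySem.Dict Int (List String) × Int :=
    freq.items.foldl (fun bm tc =>
      (bm.1.modify tc.2 [] (· ++ [tc.1]), if tc.2 > bm.2 then tc.2 else bm.2))
      (PySem.Dict.empty, 0)
  (PySem.List.pyRange bm.2 0 (-1)).foldl
    (fun ret c => ret ++ PySem.List.sorted (bm.1.getD c []) (fun x => x)) []

-- ===== PRECONDITION & SPEC =====
def Spec_solution (movie : List String) (out : List String) : Prop := out = solution_alt movie
instance (movie : List String) (out : List String) : Decidable (Spec_solution movie out) := by unfold Spec_solution; infer_instance

-- ===== CLAIM (what is proved, stated in full; the proofs are below) =====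
def Claim_equal_solution : Prop := ∀ (movie : List String), Dom_solution movie → Spec_solution movie (solution movie)

-- ===== LEMMAS AND PROOFS =====

-- A's dict-building step is the counting `modify` with default -1.
theorem stepA_eq (d : PySem.Dict String Int) (e : String) :
    (if d.contains e = false then d.insert e 0 else d.modify e 0 (· + 1))
    = d.modify e (-1) (· + 1) := by
  by_cases h : d.contains e = false
  · simp only [h, if_true, PySem.Dict.modify, PySem.Dict.getD_of_not_contains d (-1) h]
    norm_num
  · have h' : d.contains e = true := by simpa using h
    rw [PySem.Dict.contains_eq_isSome_get?] at h'
    obtain ⟨v, hv⟩ := Option.isSome_iff_exists.mp h'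
    simp only [PySem.Dict.modify, PySem.Dict.getD_eq_get?_getD, hv]
    simp [h]

theorem getD_foldA (l : List String) : ∀ (d : PySem.Dict String Int) (v : String),
    (l.foldl (fun d e => d.modify e (-1) (· + 1)) d).getD v (-1)
    = d.getD v (-1) + (List.count v l : Int) := by
  induction l with
  | nil => intro d v; simp
  | cons x l ih =>
    intro d v
    rw [List.foldl_cons, ih, PySem.Dict.getD_modify, List.count_cons]
    by_cases h : v = x
    · subst h; simp; omega
    · have hx : (x == v) = false := by simp [Ne.symm h]
      simp [h, hx]

-- A's dict items: the distinct titles in first-occurrence order, each with count - 1.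
theorem itemsA (movie : List String) :
    (movie.foldl (fun d e =>
        if d.contains e = false then d.insert e 0 else d.modify e 0 (· + 1))
      PySem.Dict.empty).items
    = (PySem.Set.ofList movie : List String).map
        (fun k => (k, (List.count k movie : Int) - 1)) := by
  have hstep : (fun (d : PySem.Dict String Int) (e : String) =>
      if d.contains e = false then d.insert e 0 else d.modify e 0 (· + 1))
      = (fun d e => d.modify e (-1) (· + 1)) := by
    funext d e; exact stepA_eq d e
  rw [hstep]
  have hkeys : (movie.foldl (fun d e => d.modify e (-1) (· + 1))
      (PySem.Dict.empty : PySem.Dict String Int)).keys = PySem.Set.ofList movie := by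
    have := PySem.Dict.keys_foldl_modify_key (ν := Int) movie (fun e => e) (-1)
      (fun _ _ => (· + 1)) PySem.Dict.empty
    simpa [PySem.Dict.keys_empty, PySem.Set.update_nil_left, List.map_id] using this
  have hnodup : (movie.foldl (fun d e => d.modify e (-1) (· + 1))
      (PySem.Dict.empty : PySem.Dict String Int)).keys.Nodup := by
    rw [hkeys]; exact PySem.Set.nodup_ofList movie
  rw [PySem.Dict.items_eq_map_keys _ hnodup (-1), hkeys]
  apply List.map_congr_left
  intro k hk
  rw [getD_foldA]
  simp [PySem.Dict.getD_empty]
  omega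

-- sorted2 with an Int first key and String second key is sorted with the lexicographic key.
theorem sorted2_eq_sorted_lex {α : Type} (xs : List α) (k1 : α → Int) (k2 : α → String) :
    PySem.List.sorted2 xs k1 k2
    = PySem.List.sorted xs (fun a => toLex (k1 a, k2 a)) := by
  simp only [PySem.List.sorted2, PySem.List.sorted]
  have hbe : (fun a b => decide (k1 a < k1 b) || (!decide (k1 b < k1 a) && decide (k2 a < k2 b)))
      = (fun a b => decide ((toLex (k1 a, k2 a) : Lex (Int × String)) < toLex (k1 b, k2 b))) := by
    funext a b
    have hlex : ((toLex (k1 a, k2 a) : Lex (Int × String)) < toLex (k1 b, k2 b))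
        ↔ (k1 a < k1 b ∨ (k1 a = k1 b ∧ k2 a < k2 b)) := Prod.Lex.toLex_lt_toLex
    rcases lt_trichotomy (k1 a) (k1 b) with h | h | h
    · simp [hlex, h, asymm h]
    · simp [Prod.Lex.toLex_lt_toLex, h, String.lt_iff_toList_lt]
    · simp [hlex, h, asymm h, h.ne']
  simp only [Bool.false_eq_true, if_false, hbe]

-- the pair-state bucket/max loop splits into two independent folds
theorem foldl_pair (l : List (String × Int)) :
    ∀ (b : PySem.Dict Int (List String)) (m : Int),
    l.foldl (fun bm tc =>
      (bm.1.modify tc.2 [] (· ++ [tc.1]), if tc.2 > bm.2 then tc.2 else bm.2)) (b, m)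
    = (l.foldl (fun bu tc => bu.modify tc.2 [] (· ++ [tc.1])) b,
       l.foldl (fun m tc => if tc.2 > m then tc.2 else m) m) := by
  induction l with
  | nil => intro b m; rfl
  | cons x l ih => intro b m; simp [List.foldl_cons, ih]

-- bucket c holds the first components of the items whose count is c, in item order
theorem getD_buckets (l : List (String × Int)) :
    ∀ (b : PySem.Dict Int (List String)) (c : Int),
    (l.foldl (fun bu tc => bu.modify tc.2 [] (· ++ [tc.1])) b).getD c []
    = b.getD c [] ++ (l.filter (fun tc => tc.2 == c)).map (·.1) := by
  induction l with
  | nil => intro b c; simp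
  | cons x l ih =>
    intro b c
    rw [List.foldl_cons, ih, PySem.Dict.getD_modify]
    by_cases h : c = x.2
    · simp [h]
    · have hx : (x.2 == c) = false := by simp [Ne.symm h]
      simp [h, hx]

theorem maxstep_eq : (fun (m : Int) (tc : String × Int) => if tc.2 > m then tc.2 else m)
    = (fun m tc => max m tc.2) := by
  funext m tc
  by_cases h : tc.2 > m <;> simp [max_def, h] <;> omega

-- the crux: A's sorted item list IS the descending-count bucket sweep
theorem sorted_items_eq (movie : List String) (M : Int)
    (hM : ∀ k ∈ (PySem.Set.ofList movie : List String), (List.count k movie : Int) ≤ M) :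
    PySem.List.sorted ((PySem.Set.ofList movie : List String).map
        (fun k => (k, (List.count k movie : Int) - 1)))
      (fun p => toLex (-p.2, p.1))
    = (PySem.List.pyRange M 0 (-1)).flatMap
        (fun c => (PySem.List.sorted ((PySem.Set.ofList movie : List String).filter
            (fun k => (List.count k movie : Int) == c)) (fun x => x)).map
          (fun k => (k, c - 1))) := by
  have hS : (PySem.Set.ofList movie : List String).Nodup := PySem.Set.nodup_ofList movie
  have hrange : (PySem.List.pyRange M 0 (-1)).Pairwise (fun c1 c2 => c2 < c1) := by
    rw [PySem.List.pyRange_neg_one_eq_reverse, List.pairwise_reverse]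
    exact PySem.List.pairwise_lt_pyRange_one _ _
  have hsorted_nodup : ∀ c : Int,
      (PySem.List.sorted ((PySem.Set.ofList movie : List String).filter
        (fun k => (List.count k movie : Int) == c)) (fun x => x)).Nodup := by
    intro c
    exact ((PySem.List.sorted_perm _ _ _).nodup_iff).mpr (hS.filter _)
  have hsorted_lt : ∀ c : Int,
      (PySem.List.sorted ((PySem.Set.ofList movie : List String).filter
        (fun k => (List.count k movie : Int) == c)) (fun x => x)).Pairwise (· < ·) := by
    intro c
    have h1 := PySem.List.sorted_pairwise ((PySem.Set.ofList movie : List String).filter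
        (fun k => (List.count k movie : Int) == c)) (fun x => x)
    exact (h1.and (hsorted_nodup c)).imp (fun h => lt_of_le_of_ne h.1 h.2)
  apply PySem.List.sorted_eq_of_perm_of_pairwise_lt
  · -- B's sweep is a permutation of A's item list
    rw [List.perm_ext_iff_of_nodup]
    · intro a
      simp only [List.mem_flatMap, List.mem_map, PySem.List.mem_sorted, List.mem_filter,
        PySem.List.mem_pyRange_neg_one, PySem.Set.mem_ofList]
      constructor
      · rintro ⟨c, ⟨h0, hcM⟩, k, ⟨hk, hc⟩, rfl⟩
        refine ⟨k, hk, ?_⟩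
        have : (List.count k movie : Int) = c := by simpa using hc
        rw [this]
      · rintro ⟨k, hk, rfl⟩
        refine ⟨(List.count k movie : Int), ⟨?_, hM k (by simpa [PySem.Set.mem_ofList])⟩,
          k, ⟨hk, by simp⟩, rfl⟩
        exact_mod_cast List.count_pos_iff.mpr hk
    · -- the sweep has no duplicate pairs
      rw [List.nodup_flatMap]
      constructor
      · intro c _
        exact (hsorted_nodup c).map (fun x y hxy => congrArg Prod.fst hxy)
      · refine hrange.imp ?_
        intro c1 c2 hgt a ha1 ha2
        simp only [List.mem_map] at ha1 ha2
        obtain ⟨k1, _, rfl⟩ := ha1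
        obtain ⟨k2, _, h2⟩ := ha2
        have := congrArg Prod.snd h2
        simp at this
        omega
    · exact hS.map (fun x y hxy => congrArg Prod.fst hxy)
  · -- the sweep is strictly increasing under A's sort key
    rw [List.pairwise_flatMap]
    constructor
    · intro c _
      rw [List.pairwise_map]
      refine (hsorted_lt c).imp ?_
      intro k k' hlt
      exact Prod.Lex.toLex_lt_toLex.mpr (Or.inr ⟨rfl, hlt⟩)
    · refine hrange.imp ?_
      intro c1 c2 hgt x hx y hy
      simp only [List.mem_map] at hx hy
      obtain ⟨k1, _, rfl⟩ := hx
      obtain ⟨k2, _, rfl⟩ := hy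
      exact Prod.Lex.toLex_lt_toLex.mpr (Or.inl (by omega))

-- ===== VERDICT (by name: the statement is the Claim_ definition above) =====
theorem solution_spec : Claim_equal_solution := by
  unfold Claim_equal_solution Spec_solution
  intro movie _
  simp only [solution, solution_alt]
  rw [itemsA, sorted2_eq_sorted_lex, PySem.Dict.foldl_insert_getD_add_one_eq_counter,
    PySem.Dict.items_counter, foldl_pair, maxstep_eq]
  simp only
  rw [PySem.List.foldl_append_singleton_eq_map, PySem.List.foldl_append_eq_flatMap]
  simp only [List.nil_append]
  have hM := (PySem.List.le_foldl_max_int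
      ((PySem.Set.ofList movie : List String).map (fun k => (k, (List.count k movie : Int))))
      (·.2) 0).2
  rw [sorted_items_eq movie _ (fun k hk => hM _ (List.mem_map_of_mem hk))]
  simp only [getD_buckets, PySem.Dict.getD_empty, List.nil_append, List.filter_map,
    List.map_flatMap, List.map_map]
  simp [Function.comp_def]
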